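-- pv_equiv track=rewrite | github.com/DanielSuba/A-Smart-Archive-of-Student-Projects | backend/services/difficulty_scorer.py | _score_intermediate_technologies
-- ===== SOURCE A (Python) =====
-- from typing import Dict, List
--
-- ADVANCED_TECH = {
--     "Kubernetes", "TensorFlow", "PyTorch", "Elasticsearch", "GraphQL",
--     "React Native", "Flutter", "Rust", "Go", "Scala", "Spring Boot",
--     "AWS", "Azure", "GCP", "Docker", "scikit-learn"
-- }
--
-- INTERMEDIATE_TECH = {
--     "React", "Vue.js", "Angular", "FastAPI", "Django", "Node.js",
--     "PostgreSQL", "MongoDB", "Redis", "TypeScript", "Docker", "GraphQL",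
--     "Python"
-- }
--
-- def _score_intermediate_technologies(technologies: List[Dict]) -> int:
--     score = 0
--     intermediate_count = 0
--     for tech in technologies:
--         name = tech.get("name")
--         if name in ADVANCED_TECH:
--             continue
--         if name in INTERMEDIATE_TECH:
--             intermediate_count += 1
--             score += 3 if intermediate_count <= 3 else 1
--         else:
--             score += 1
--     return score
-- ===== SOURCE B (Python) =====
-- from typing import Dict, List
--
-- ADVANCED_TECH = {
--     "Kubernetes", "TensorFlow", "PyTorch", "Elasticsearch", "GraphQL",
--     "React Native", "Flutter", "Rust", "Go", "Scala", "Spring Boot",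
--     "AWS", "Azure", "GCP", "Docker", "scikit-learn"
-- }
--
-- INTERMEDIATE_TECH = {
--     "React", "Vue.js", "Angular", "FastAPI", "Django", "Node.js",
--     "PostgreSQL", "MongoDB", "Redis", "TypeScript", "Docker", "GraphQL",
--     "Python"
-- }
--
-- def _score_intermediate_technologies(technologies: List[Dict]) -> int:
--     names = [t.get("name") for t in technologies]
--     nonadv = sum(1 for n in names if n not in ADVANCED_TECH)
--     inter = sum(1 for n in names if n not in ADVANCED_TECH and n in INTERMEDIATE_TECH)
--     return nonadv + 2 * min(3, inter)
-- ===== Notes on version B (the rewrite author's own statement) =====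
-- stated objective: simpler
-- what changed: Replaces the stateful loop (running intermediate_count with a per-element 3-or-1 score) by two membership counts and the closed form nonadv + 2*min(3, inter).
import Mathlib
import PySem

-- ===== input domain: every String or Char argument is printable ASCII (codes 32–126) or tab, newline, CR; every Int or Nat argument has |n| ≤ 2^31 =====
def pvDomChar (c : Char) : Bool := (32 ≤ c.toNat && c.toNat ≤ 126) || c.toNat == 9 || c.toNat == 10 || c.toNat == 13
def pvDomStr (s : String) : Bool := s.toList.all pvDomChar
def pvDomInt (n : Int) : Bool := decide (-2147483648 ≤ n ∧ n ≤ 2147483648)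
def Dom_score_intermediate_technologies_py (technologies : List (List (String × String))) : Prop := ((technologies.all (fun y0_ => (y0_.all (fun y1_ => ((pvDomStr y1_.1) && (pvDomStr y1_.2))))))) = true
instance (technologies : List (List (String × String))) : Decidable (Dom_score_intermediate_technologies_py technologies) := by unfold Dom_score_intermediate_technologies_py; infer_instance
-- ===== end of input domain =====

-- ===== PORT A =====
-- B simplifies A: two membership counts and the closed form nonadv + 2*min(3, inter) replace A's stateful loop.
def pvAdvTech : List String := ["Kubernetes", "TensorFlow", "PyTorch", "Elasticsearch", "GraphQL", "React Native", "Flutter", "Rust", "Go", "Scala", "Spring Boot", "AWS", "Azure", "GCP", "Docker", "scikit-learn"]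

def pvInterTech : List String := ["React", "Vue.js", "Angular", "FastAPI", "Django", "Node.js", "PostgreSQL", "MongoDB", "Redis", "TypeScript", "Docker", "GraphQL", "Python"]

-- Python 'name in SET' where name : Option String (tech.get("name")); None is in no set.
def pvOptMem (o : Option String) (l : List String) : Bool :=
  match o with
  | some n => l.contains n
  | none => false

-- one iteration of A's loop body (state = (score, intermediate_count))
def pvStepA (st : Int × Int) (tech : List (String × String)) : Int × Int :=
  let name := PySem.Dict.get? ⟨tech⟩ "name"
  if pvOptMem name pvAdvTech then st
  else if pvOptMem name pvInterTech then
    (st.1 + (if st.2 + 1 ≤ 3 then 3 else 1), st.2 + 1)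
  else (st.1 + 1, st.2)

def score_intermediate_technologies_py (technologies : List (List (String × String))) : Int :=
  (technologies.foldl pvStepA (0, 0)).1

-- ===== PORT B =====
def score_intermediate_technologies_py_alt (technologies : List (List (String × String))) : Int :=
  let names := technologies.map (fun t => PySem.Dict.get? ⟨t⟩ "name")
  let nonadv : Int := (names.countP (fun n => !pvOptMem n pvAdvTech) : Nat)
  let inter : Int := (names.countP (fun n => !pvOptMem n pvAdvTech && pvOptMem n pvInterTech) : Nat)
  nonadv + 2 * min 3 inter

-- ===== PRECONDITION & SPEC =====
def Spec_score_intermediate_technologies_py (technologies : List (List (String × String))) (out : Int) : Prop := out = score_intermediate_technologies_py_alt technologies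
instance (technologies : List (List (String × String))) (out : Int) : Decidable (Spec_score_intermediate_technologies_py technologies out) := by unfold Spec_score_intermediate_technologies_py; infer_instance

-- ===== CLAIM (what is proved, stated in full; the proofs are below) =====
def Claim_equal_score_intermediate_technologies_py : Prop := ∀ (technologies : List (List (String × String))), Dom_score_intermediate_technologies_py technologies → Spec_score_intermediate_technologies_py technologies (score_intermediate_technologies_py technologies)

-- ===== LEMMAS AND PROOFS =====

-- ===== LEMMAS AND PROOFS =====
theorem pv_loop_eq (ts : List (List (String × String))) : ∀ (s c : Int),
    (ts.foldl pvStepA (s, c)).1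
    = s + ((ts.countP (fun t => !pvOptMem (PySem.Dict.get? ⟨t⟩ "name") pvAdvTech) : Nat))
        + 2 * min (max (3 - c) 0)
            ((ts.countP (fun t => !pvOptMem (PySem.Dict.get? ⟨t⟩ "name") pvAdvTech
                && pvOptMem (PySem.Dict.get? ⟨t⟩ "name") pvInterTech) : Nat)) := by
  induction ts with
  | nil => intro s c; simp
  | cons t rest ih =>
    intro s c
    rw [List.foldl_cons, List.countP_cons, List.countP_cons]
    by_cases ha : pvOptMem (PySem.Dict.get? ⟨t⟩ "name") pvAdvTech
    · have hstep : pvStepA (s, c) t = (s, c) := by simp [pvStepA, ha]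
      rw [hstep, ih]
      simp [ha]
    · by_cases hi : pvOptMem (PySem.Dict.get? ⟨t⟩ "name") pvInterTech
      · have hstep : pvStepA (s, c) t = (s + (if c + 1 ≤ 3 then 3 else 1), c + 1) := by
          simp [pvStepA, ha, hi]
        rw [hstep, ih]
        simp only [ha, hi, Bool.not_false, Bool.and_self, if_true]
        push_cast
        split_ifs <;> omega
      · have hstep : pvStepA (s, c) t = (s + 1, c) := by simp [pvStepA, ha, hi]
        rw [hstep, ih]
        simp only [ha, hi, Bool.not_false, Bool.and_false, Bool.false_eq_true, if_false]
        push_cast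
        omega

-- ===== VERDICT (by name: the statement is the Claim_ definition above) =====
theorem score_intermediate_technologies_py_spec : Claim_equal_score_intermediate_technologies_py := by
  intro ts _
  unfold Spec_score_intermediate_technologies_py score_intermediate_technologies_py score_intermediate_technologies_py_alt
  rw [pv_loop_eq]
  simp only [List.countP_map, Function.comp_def]
  push_cast
  omega
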